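-- pv_equiv track=rewrite | github.com/eliwangj/deepnlp | DeepNLP/model/DSeg.py | space_handle
-- ===== SOURCE A (Python) =====
-- def space_handle(sentence_list):
--     space_index = []
--     new_sentence_list = []
--     for s in sentence_list:
--
--         index_list = [i for i, c in enumerate(s) if c == ' ']
--         while ' ' in s:
--             s.remove(' ')
--         new_sentence_list.append(s)
--         space_index.append(index_list)
--     return new_sentence_list, space_index
-- ===== SOURCE B (Python) =====
-- def space_handle(sentence_list):
--     # Single linear scan per sentence (no index-comprehension + repeated remove);
--     # mutates each inner list in place via s[:] = kept, like A's s.remove loop.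
--     new_sentence_list = []
--     space_index = []
--     for s in sentence_list:
--         kept = []
--         idxs = []
--         for i, c in enumerate(s):
--             if c == ' ':
--                 idxs.append(i)
--             else:
--                 kept.append(c)
--         s[:] = kept
--         new_sentence_list.append(s)
--         space_index.append(idxs)
--     return new_sentence_list, space_index
-- ===== Notes on version B (the rewrite author's own statement) =====
-- stated objective: simpler
-- what changed: Replaces A's per-sentence index comprehension plus a repeated 'while " " in s: s.remove(" ")' loop with one linear enumerate pass that collects kept tokens and space indices together, then assigns s[:] = kept.
import Mathlib
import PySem

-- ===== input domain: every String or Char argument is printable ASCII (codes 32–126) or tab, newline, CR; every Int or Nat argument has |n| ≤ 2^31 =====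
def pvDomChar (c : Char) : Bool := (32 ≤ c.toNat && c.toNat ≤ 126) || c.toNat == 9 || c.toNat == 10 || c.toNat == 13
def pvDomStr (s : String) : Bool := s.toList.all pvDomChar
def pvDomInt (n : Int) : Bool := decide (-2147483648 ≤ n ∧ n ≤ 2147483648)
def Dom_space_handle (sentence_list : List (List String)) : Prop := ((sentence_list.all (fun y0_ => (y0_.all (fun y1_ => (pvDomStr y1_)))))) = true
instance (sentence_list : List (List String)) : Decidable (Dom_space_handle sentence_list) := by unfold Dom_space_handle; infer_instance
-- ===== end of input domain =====

-- B replaces A's index comprehension + repeated remove(' ') loop with one linear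
-- enumerate pass per sentence. A mutates the inner lists in place; B performs the
-- same mutation via s[:] = kept, so the return-value equivalence proved here also
-- reflects identical observable mutation.

-- ===== PORT A =====
-- while ' ' in s: s.remove(' ')
def removeAllSpaces (s : List String) : List String :=
  if h : " " ∈ s then
    removeAllSpaces ((PySem.List.remove? s " ").getD s)
  else s
termination_by s.length
decreasing_by
  simp only [PySem.List.remove?_eq_some_erase s " " h, Option.getD_some,
    List.length_erase_of_mem h]
  have := List.length_pos_of_mem h
  omega

def space_handle (sentence_list : List (List String)) : List (List String) × List (List Int) :=
  sentence_list.foldl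
    (fun (acc : List (List String) × List (List Int)) s =>
      let index_list : List Int :=
        ((PySem.List.enumerate s 0).filter (fun p => p.2 == " ")).map (·.1)
      let s' := removeAllSpaces s
      (acc.1 ++ [s'], acc.2 ++ [index_list]))
    ([], [])

-- ===== PORT B =====
def space_handle_alt (sentence_list : List (List String)) : List (List String) × List (List Int) :=
  sentence_list.foldl
    (fun (acc : List (List String) × List (List Int)) s =>
      let r := (PySem.List.enumerate s 0).foldl
        (fun (kq : List String × List Int) p =>
          if p.2 == " " then (kq.1, kq.2 ++ [p.1]) else (kq.1 ++ [p.2], kq.2))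
        ([], [])
      (acc.1 ++ [r.1], acc.2 ++ [r.2]))
    ([], [])

-- ===== PRECONDITION & SPEC =====
def Spec_space_handle (sentence_list : List (List String)) (out : List (List String) × List (List Int)) : Prop := out = space_handle_alt sentence_list
instance (sentence_list : List (List String)) (out : List (List String) × List (List Int)) : Decidable (Spec_space_handle sentence_list out) := by unfold Spec_space_handle; infer_instance

-- ===== CLAIM (what is proved, stated in full; the proofs are below) =====
def Claim_equal_space_handle : Prop := ∀ (sentence_list : List (List String)), Dom_space_handle sentence_list → Spec_space_handle sentence_list (space_handle sentence_list)

-- ===== LEMMAS AND PROOFS =====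

-- B's inner fold splits into the kept elements and the space indices.
theorem inner_fold_eq (l : List (Int × String)) (k : List String) (q : List Int) :
    l.foldl (fun (kq : List String × List Int) p =>
        if p.2 == " " then (kq.1, kq.2 ++ [p.1]) else (kq.1 ++ [p.2], kq.2)) (k, q)
      = (k ++ (l.filter (fun p => !(p.2 == " "))).map (·.2),
         q ++ (l.filter (fun p => p.2 == " ")).map (·.1)) := by
  induction l generalizing k q with
  | nil => simp
  | cons a t ih =>
    simp only [List.foldl_cons, List.filter_cons]
    by_cases h : a.2 = " "
    · rw [if_pos (by simp [h]), ih]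
      simp [h]
    · rw [if_neg (by simp [h]), ih]
      simp [h]

-- the kept elements of an enumerate pass are the filtered sentence
theorem enum_filter_snd (s : List String) (n : Int) :
    ((PySem.List.enumerate s n).filter (fun p => !(p.2 == " "))).map (·.2)
      = s.filter (fun c => !(c == " ")) := by
  induction s generalizing n with
  | nil => simp [PySem.List.enumerate_nil]
  | cons a t ih =>
    by_cases h : a = " " <;> simp [PySem.List.enumerate_cons, h, ih]

theorem erase_filter (s : List String) :
    (s.erase " ").filter (fun c => !(c == " ")) = s.filter (fun c => !(c == " ")) := by
  induction s with
  | nil => simp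
  | cons a t ih =>
    by_cases h : a = " "
    · simp [h]
    · simp [h, ih]

-- A's while-remove loop computes the space-free filter of the sentence
theorem removeAllSpaces_eq (s : List String) :
    removeAllSpaces s = s.filter (fun c => !(c == " ")) := by
  rw [removeAllSpaces]
  split_ifs with h
  · rw [PySem.List.remove?_eq_some_erase s " " h, Option.getD_some,
      removeAllSpaces_eq (s.erase " ")]
    exact erase_filter s
  · symm
    refine List.filter_eq_self.mpr (fun a ha => ?_)
    simp only [Bool.not_eq_eq_eq_not, Bool.not_true, beq_eq_false_iff_ne]
    exact fun e => h (e ▸ ha)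
termination_by s.length
decreasing_by
  simp only [List.length_erase_of_mem h]
  have := List.length_pos_of_mem h
  omega

-- the two outer folds use pointwise-equal step functions
theorem step_eq :
    (fun (acc : List (List String) × List (List Int)) (s : List String) =>
      let index_list : List Int :=
        ((PySem.List.enumerate s 0).filter (fun p => p.2 == " ")).map (·.1)
      let s' := removeAllSpaces s
      (acc.1 ++ [s'], acc.2 ++ [index_list]))
    = (fun (acc : List (List String) × List (List Int)) (s : List String) =>
      let r := (PySem.List.enumerate s 0).foldl
        (fun (kq : List String × List Int) p =>
          if p.2 == " " then (kq.1, kq.2 ++ [p.1]) else (kq.1 ++ [p.2], kq.2))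
        ([], [])
      (acc.1 ++ [r.1], acc.2 ++ [r.2])) := by
  funext acc s
  simp only [inner_fold_eq, List.nil_append, removeAllSpaces_eq, enum_filter_snd]

-- ===== VERDICT (by name: the statement is the Claim_ definition above) =====
theorem space_handle_spec : Claim_equal_space_handle := by
  intro sentence_list _
  show space_handle sentence_list = space_handle_alt sentence_list
  unfold space_handle space_handle_alt
  rw [step_eq]
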